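-- pv_equiv track=rewrite | github.com/kyuhyongpark/boolmore | boolmore/conversions.py | get_uni_rr
-- ===== SOURCE A (Python) =====
-- import math
-- import itertools as it
--
-- def get_uni_rr(rr:str, max:bool=True) -> str:
--     """
--     Returns the unique binary representation (max or min) of a rule
--     when given any binary representation of a rule.
--
--     Parameters
--     ----------
--     rr  - representation of the rule            :length 2^k binary str
--     max - if True, get maximal representation   :bool
--           if False, get minimal representation
--
--     Returns
--     -------
--     uni_rr - unique representation of the rules                 :length 2^k binary str
--              if maximal, it is equivalent to the truth table
--              if minimal, it is in a Blake canonical form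
--
--     """
--     # k = number of regulators
--     n = len(rr)
--     k = int(math.log2(n))
--
--     # already minimal if the node is a fixed node
--     if k == 0:
--         return rr
--
--     uni_rr = list(rr)
--
--     modified = []
--
--     # iterate through the string in reverse
--     for i in range(n):
--         # get the regulator values if there is '1'
--         if uni_rr[-i-1] == '1':
--             # bi represents the regulator values in binary string
--             bi = format(i, '0' + str(k) + 'b')
--         else:
--             continue
--         # find all the positions that need to be changed to 0
--         if bi in modified:
--             continue
--
--         lst = []
--         for num in bi:
--             if num == '0':
--                 lst.append(['0', '1'])
--             else:
--                 lst.append(['1'])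
--         positions = [''.join(p) for p in it.product(*lst)]
--         # do not change the original position
--         positions.remove(bi)
--         modified.extend(positions)
--         # change to '0' if min or '1' if max in the gained positions
--         for position in positions:
--             j = n - int(position,2) - 1
--             uni_rr[j] = str(int(max))
--
--     uni_rr = ''.join(uni_rr)
--
--     return uni_rr
-- ===== SOURCE B (Python) =====
-- def get_uni_rr(rr: str, max: bool = True) -> str:
--     # subset-lattice (zeta) DP: sub[i] becomes True once some submask position of i holds '1'
--     n = len(rr)
--     if n < 2:
--         return rr
--     k = n.bit_length() - 1
--     sub = [rr[n - 1 - i] == '1' for i in range(n)]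
--     for d in range(k):
--         bit = 1 << d
--         for i in range(n):
--             if i & bit:
--                 sub[i] = sub[i] or sub[i ^ bit]
--     out = []
--     for idx in range(n):
--         i = n - 1 - idx
--         if any(sub[i ^ (1 << d)] for d in range(k) if i & (1 << d)):
--             out.append('1' if max else '0')
--         else:
--             out.append(rr[idx])
--     return ''.join(out)
-- ===== Notes on version B (the rewrite author's own statement) =====
-- stated objective: alternative
-- what changed: A mutates the rule string in place, expanding each positive minterm into all its superset positions via itertools.product with a seen-positions side list; B instead runs a subset-lattice (zeta) dynamic program, one OR-pass per regulator dimension, then reads each output character off the DP table.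
-- outside the precondition, e.g. on get_uni_rr('10110', False): A returns '10000', B returns '10110'; on get_uni_rr('', True): A raises ValueError, B returns ''
import Mathlib
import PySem

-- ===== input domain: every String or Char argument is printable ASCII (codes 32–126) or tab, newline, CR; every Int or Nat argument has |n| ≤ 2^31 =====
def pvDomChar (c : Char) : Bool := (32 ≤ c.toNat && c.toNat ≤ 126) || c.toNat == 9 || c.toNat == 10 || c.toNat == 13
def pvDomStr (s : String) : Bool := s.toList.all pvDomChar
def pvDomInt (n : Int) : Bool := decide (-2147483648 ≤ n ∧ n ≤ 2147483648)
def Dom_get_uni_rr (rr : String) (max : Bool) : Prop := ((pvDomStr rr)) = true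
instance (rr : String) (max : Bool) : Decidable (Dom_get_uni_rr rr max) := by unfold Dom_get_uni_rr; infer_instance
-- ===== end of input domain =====

-- B replaces A's in-place minterm expansion (itertools.product plus a seen-positions side list)
-- by a subset-lattice (zeta) dynamic program read out per position; equal on inputs admitted by Pre_.

-- ===== PORT A =====

-- format(i, 'b'): binary digits of i, no padding ('0' for i = 0)
def pvBinDigits (i : Nat) : List Char :=
  if h : i < 2 then [if i = 1 then '1' else '0']
  else pvBinDigits (i / 2) ++ [if i % 2 = 1 then '1' else '0']
decreasing_by exact Nat.div_lt_self (by omega) (by omega)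

-- format(i, '0' + str(k) + 'b'): zero-pad on the left to width k
def pvFormat (i k : Nat) : List Char :=
  List.replicate (k - (pvBinDigits i).length) '0' ++ pvBinDigits i

-- [''.join(p) for p in it.product(*lst)] where lst has ['0','1'] at '0'-slots of bi and ['1'] at the others
def pvProd : List Char → List (List Char)
  | [] => [[]]
  | c :: rest =>
    let tails := pvProd rest
    if c = '0' then tails.map (fun t => '0' :: t) ++ tails.map (fun t => '1' :: t)
    else tails.map (fun t => '1' :: t)

-- int(position, 2) on the generated (pure '0'/'1') strings
def pvBinVal (bs : List Char) : Nat :=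
  bs.foldl (fun a c => 2 * a + (if c = '1' then 1 else 0)) 0

-- one iteration of A's main loop; state = (uni_rr as a char list, modified)
def pvStepA (n k : Nat) (max : Bool) (st : List Char × List (List Char)) (i : Nat) :
    List Char × List (List Char) :=
  let uni := st.1
  let modif := st.2
  if uni.getD (n - i - 1) ' ' = '1' then      -- uni_rr[-i-1]; i < n so the index is in range
    let bi := pvFormat i k
    if bi ∈ modif then st
    else
      let positions := (pvProd bi).erase bi   -- positions.remove(bi); bi is always present
      let modif' := modif ++ positions
      let uni' := positions.foldl
        (fun u p => PySem.List.pySetD u ((n : Int) - (pvBinVal p : Int) - 1) (if max then '1' else '0')) uni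
      (uni', modif')
  else st

def get_uni_rr (rr : String) (max : Bool) : String :=
  let n := rr.length
  let k := Nat.log2 n        -- int(math.log2(n)); exact whenever n is a power of two (Pre_)
  if k = 0 then rr
  else String.ofList (((List.range n).foldl (pvStepA n k max) (rr.toList, [])).1)

-- ===== PORT B =====

def get_uni_rr_alt (rr : String) (max : Bool) : String :=
  let n := rr.length
  if n < 2 then rr
  else
    let k := Nat.size n - 1          -- n.bit_length() - 1
    let chars := rr.toList
    let sub0 := (List.range n).map (fun i => chars.getD (n - 1 - i) ' ' == '1')
    let sub := (List.range k).foldl (fun s d =>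
      let bit := 1 <<< d
      (List.range n).foldl (fun s i =>
        if i &&& bit ≠ 0 then s.set i (s.getD i false || s.getD (i ^^^ bit) false) else s) s) sub0
    String.ofList ((List.range n).foldl (fun acc idx =>
      let i := n - 1 - idx
      acc ++ [if (List.range k).any (fun d => decide (i &&& (1 <<< d) ≠ 0) && sub.getD (i ^^^ (1 <<< d)) false) then
          (if max then '1' else '0')
        else chars.getD idx ' ']) [])

-- ===== PRECONDITION & SPEC =====
-- Pre_ admits the function's stated domain (length-2^k strings) and, beyond it, every string
-- without a one-character (on which the loop is vacuous); it excludes the empty string (A raises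
-- ValueError) and other-length strings containing a one-character, where A's padding and
-- negative-index arithmetic return accidental values.
def Pre_get_uni_rr (rr : String) (max : Bool) : Prop :=
  rr.length ≠ 0 ∧ (rr.length = 2 ^ Nat.log2 rr.length ∨ '1' ∉ rr.toList)
instance (rr : String) (max : Bool) : Decidable (Pre_get_uni_rr rr max) := by
  unfold Pre_get_uni_rr; infer_instance

def pvWitness_get_uni_rr : String × Bool := ("0110", true)

def Spec_get_uni_rr (rr : String) (max : Bool) (out : String) : Prop := out = get_uni_rr_alt rr max
instance (rr : String) (max : Bool) (out : String) : Decidable (Spec_get_uni_rr rr max out) := by unfold Spec_get_uni_rr; infer_instance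

-- ===== CLAIM (what is proved, stated in full; the proofs are below) =====
def Claim_equal_get_uni_rr : Prop := ∀ (rr : String) (max : Bool), Dom_get_uni_rr rr max → Pre_get_uni_rr rr max → Spec_get_uni_rr rr max (get_uni_rr rr max)
-- ===== LEMMAS AND PROOFS =====

-- subset-of-bits order: j &&& i = j  means every set bit of j is set in i
theorem pvAnd_left_iff (m q : Nat) : m &&& q = m ↔ ∀ t, m.testBit t = true → q.testBit t = true := by
  constructor
  · intro h t hm
    have h2 := congrArg (fun x => x.testBit t) h
    simpa [Nat.testBit_and, hm] using h2
  · intro h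
    apply Nat.eq_of_testBit_eq
    intro t
    simp only [Nat.testBit_and, Bool.and_eq_left_iff_imp]
    intro hm; exact h t hm

theorem pvAnd_trans {a b c : Nat} (h1 : a &&& b = a) (h2 : b &&& c = b) : a &&& c = a := by
  rw [pvAnd_left_iff] at *
  exact fun t ht => h2 t (h1 t ht)

theorem pvAnd_antisymm {a b : Nat} (h1 : a &&& b = a) (h2 : b &&& a = b) : a = b := by
  rw [pvAnd_left_iff] at *
  apply Nat.eq_of_testBit_eq
  intro t
  by_cases ha : a.testBit t = true
  · simp [ha, h1 t ha]
  · by_cases hb : b.testBit t = true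
    · simp [h2 t hb] at ha
    · simp [Bool.not_eq_true] at ha hb; rw [ha, hb]

-- the k-bit binary string of m (LSB last), the normal form of pvFormat on the admitted range
def toBinK : Nat → Nat → List Char
  | 0, _ => []
  | k+1, m => toBinK k (m / 2) ++ [if m % 2 = 1 then '1' else '0']

theorem toBinK_zero (k : Nat) : toBinK k 0 = List.replicate k '0' := by
  induction k with
  | zero => rfl
  | succ k ih => simp [toBinK, ih, List.replicate_succ']

theorem toBinK_cons (k m : Nat) :
    toBinK (k+1) m = (if m.testBit k then '1' else '0') :: toBinK k (m % 2^k) := by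
  induction k generalizing m with
  | zero =>
    simp [toBinK, Nat.testBit_zero]
  | succ k ih =>
    have key : m % 2^(k+1) = m % 2 + 2 * ((m/2) % 2^k) := by
      have h2 : (2:Nat)^(k+1) = 2*2^k := by ring
      rw [h2, Nat.mod_mul]
    have hd : (m % 2^(k+1)) / 2 = (m/2) % 2^k := by omega
    have hm2 : (m % 2^(k+1)) % 2 = m % 2 := by omega
    calc toBinK (k+2) m = toBinK (k+1) (m/2) ++ [if m % 2 = 1 then '1' else '0'] := rfl
      _ = ((if (m/2).testBit k then '1' else '0') :: toBinK k ((m/2) % 2^k)) ++ [if m % 2 = 1 then '1' else '0'] := by rw [ih]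
      _ = (if m.testBit (k+1) then '1' else '0') :: (toBinK k ((m/2) % 2^k) ++ [if m % 2 = 1 then '1' else '0']) := by
            rw [Nat.testBit_add_one]; rfl
      _ = (if m.testBit (k+1) then '1' else '0') :: toBinK (k+1) (m % 2^(k+1)) := by
            have hr : toBinK (k+1) (m % 2^(k+1)) = toBinK k ((m % 2^(k+1))/2) ++ [if (m % 2^(k+1)) % 2 = 1 then '1' else '0'] := rfl
            rw [hr, hd, hm2]

theorem pvBinVal_append (bs : List Char) (c : Char) :
    pvBinVal (bs ++ [c]) = 2 * pvBinVal bs + (if c = '1' then 1 else 0) := by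
  simp [pvBinVal, List.foldl_append]

theorem pvBinVal_toBinK (k m : Nat) : pvBinVal (toBinK k m) = m % 2 ^ k := by
  induction k generalizing m with
  | zero => simp [toBinK, pvBinVal, Nat.mod_one]
  | succ k ih =>
    have h0 : toBinK (k+1) m = toBinK k (m/2) ++ [if m % 2 = 1 then '1' else '0'] := rfl
    rw [h0, pvBinVal_append, ih]
    have key : m % 2^(k+1) = m % 2 + 2 * ((m/2) % 2^k) := by
      have h2 : (2:Nat)^(k+1) = 2*2^k := by ring
      rw [h2, Nat.mod_mul]
    rcases Nat.mod_two_eq_zero_or_one m with h | h <;> simp [h] <;> omega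

theorem toBinK_inj {k m q : Nat} (hm : m < 2^k) (hq : q < 2^k)
    (h : toBinK k m = toBinK k q) : m = q := by
  have := congrArg pvBinVal h
  rwa [pvBinVal_toBinK, pvBinVal_toBinK, Nat.mod_eq_of_lt hm, Nat.mod_eq_of_lt hq] at this

theorem pvFormat_eq {k m : Nat} (hk : 1 ≤ k) (hm : m < 2^k) : pvFormat m k = toBinK k m := by
  induction k generalizing m with
  | zero => omega
  | succ k ih =>
    unfold pvFormat
    by_cases h2 : m < 2
    · rw [pvBinDigits, dif_pos h2]
      have hr : toBinK (k+1) m = toBinK k (m/2) ++ [if m % 2 = 1 then '1' else '0'] := rfl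
      rw [hr]
      have hd : m / 2 = 0 := by omega
      rw [hd, toBinK_zero]
      have hbit : (if m = 1 then '1' else '0') = (if m % 2 = 1 then '1' else '0') := by
        interval_cases m <;> rfl
      rw [hbit]
      norm_num
    · have hk' : 1 ≤ k := by
        by_contra hc
        have hz : k = 0 := by omega
        subst hz
        norm_num at hm
        omega
      rw [pvBinDigits, dif_neg (by omega)]
      have hlen : (pvBinDigits (m/2) ++ [if m % 2 = 1 then '1' else '0']).length
          = (pvBinDigits (m/2)).length + 1 := by simp
      rw [hlen]
      have hstep : k + 1 - ((pvBinDigits (m/2)).length + 1) = k - (pvBinDigits (m/2)).length := by omega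
      rw [hstep]
      have hm2 : m / 2 < 2^k := by
        have hp : (2:Nat)^(k+1) = 2*2^k := by ring
        omega
      have hih := ih hk' hm2
      unfold pvFormat at hih
      calc List.replicate (k - (pvBinDigits (m/2)).length) '0' ++ (pvBinDigits (m/2) ++ [if m % 2 = 1 then '1' else '0'])
          = (List.replicate (k - (pvBinDigits (m/2)).length) '0' ++ pvBinDigits (m/2)) ++ [if m % 2 = 1 then '1' else '0'] := by
            rw [List.append_assoc]
        _ = toBinK k (m/2) ++ [if m % 2 = 1 then '1' else '0'] := by rw [hih]
        _ = toBinK (k+1) m := rfl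

theorem nodup_pvProd (bs : List Char) : (pvProd bs).Nodup := by
  induction bs with
  | nil => simp [pvProd]
  | cons c rest ih =>
    have hinj : ∀ (a : Char), Function.Injective (fun t : List Char => a :: t) := by
      intro a x y h
      simpa using h
    unfold pvProd
    split
    · refine List.Nodup.append (ih.map (hinj '0')) (ih.map (hinj '1')) ?_
      intro x hx hy
      simp only [List.mem_map] at hx hy
      obtain ⟨t, _, rfl⟩ := hx
      obtain ⟨t', _, h⟩ := hy
      exact absurd (List.head_eq_of_cons_eq h.symm) (by decide)
    · exact ih.map (hinj '1')

theorem pvTestBit_high {k m t : Nat} (hm : m < 2^k) (ht : k ≤ t) : m.testBit t = false :=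
  Nat.testBit_lt_two_pow (Nat.lt_of_lt_of_le hm (Nat.pow_le_pow_right (by omega) ht))

theorem pvSplit {k m : Nat} (h1 : 2^k ≤ m) (h2 : m < 2^(k+1)) : m = 2^k + m % 2^k := by
  have hp : (2:Nat)^(k+1) = 2*2^k := by ring
  have hd : m - 2^k < 2^k := by omega
  have hmod : m % 2^k = m - 2^k := by
    rw [Nat.mod_eq_sub_mod h1, Nat.mod_eq_of_lt hd]
  omega

theorem pvTopBit {k m : Nat} (h2 : m < 2^(k+1)) : m.testBit k = decide (2^k ≤ m) := by
  by_cases h : 2^k ≤ m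
  · have hs := pvSplit h h2
    have hlt : m % 2^k < 2^k := Nat.mod_lt _ (by positivity)
    rw [hs, Nat.testBit_two_pow_add_eq, Nat.testBit_lt_two_pow hlt]
    simp
  · rw [Nat.testBit_lt_two_pow (by omega)]
    simp [h]

theorem pvAnd_add_pow {k m q : Nat} (hm : m < 2^k) :
    m &&& (2^k + q) = m ↔ m &&& q = m := by
  rw [pvAnd_left_iff, pvAnd_left_iff]
  constructor
  · intro h t ht
    have hlt : t < k := by
      by_contra hc
      rw [pvTestBit_high hm (by omega)] at ht
      exact absurd ht (by simp)
    have := h t ht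
    rwa [Nat.testBit_two_pow_add_gt hlt] at this
  · intro h t ht
    have hlt : t < k := by
      by_contra hc
      rw [pvTestBit_high hm (by omega)] at ht
      exact absurd ht (by simp)
    rw [Nat.testBit_two_pow_add_gt hlt]
    exact h t ht

theorem pvAnd_both_pow {k m' q' : Nat} (hm : m' < 2^k) (hq : q' < 2^k) :
    (2^k + m') &&& (2^k + q') = 2^k + m' ↔ m' &&& q' = m' := by
  rw [pvAnd_left_iff, pvAnd_left_iff]
  constructor
  · intro h t ht
    have hlt : t < k := by
      by_contra hc
      rw [pvTestBit_high hm (by omega)] at ht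
      exact absurd ht (by simp)
    have h2 := h t (by rwa [Nat.testBit_two_pow_add_gt hlt])
    rwa [Nat.testBit_two_pow_add_gt hlt] at h2
  · intro h t ht
    by_cases hlt : t < k
    · rw [Nat.testBit_two_pow_add_gt hlt] at ht ⊢
      exact h t ht
    · by_cases hek : t = k
      · subst hek
        rw [Nat.testBit_two_pow_add_eq, Nat.testBit_lt_two_pow hq]
        rfl
      · rw [pvTestBit_high (show (2:Nat)^k + m' < 2^(t) from ?_) (le_refl t)] at ht
        · exact absurd ht (by simp)
        · have hle : (2:Nat)^(k+1) ≤ 2^t := Nat.pow_le_pow_right (by omega) (by omega)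
          have hp : (2:Nat)^(k+1) = 2*2^k := by ring
          omega

theorem mem_pvProd {k m : Nat} (hm : m < 2^k) (x : List Char) :
    x ∈ pvProd (toBinK k m) ↔ ∃ q, q < 2^k ∧ x = toBinK k q ∧ m &&& q = m := by
  induction k generalizing m x with
  | zero =>
    have hm0 : m = 0 := by omega
    subst hm0
    constructor
    · intro hx
      simp only [toBinK, pvProd, List.mem_singleton] at hx
      exact ⟨0, by omega, by simp [hx, toBinK], by decide⟩
    · rintro ⟨q, hq, rfl, -⟩
      have hq0 : q = 0 := by omega
      subst hq0
      simp [toBinK, pvProd]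
  | succ k ih =>
    have hpow : (2:Nat)^(k+1) = 2*2^k := by ring
    have hq2 : ∀ q' : Nat, q' < 2^k → toBinK (k+1) q' = '0' :: toBinK k q' := by
      intro q' hq'
      rw [toBinK_cons, Nat.testBit_lt_two_pow hq', Nat.mod_eq_of_lt hq']
      rfl
    have hq3 : ∀ q' : Nat, q' < 2^k → toBinK (k+1) (2^k + q') = '1' :: toBinK k q' := by
      intro q' hq'
      rw [toBinK_cons, Nat.testBit_two_pow_add_eq, Nat.testBit_lt_two_pow hq',
        Nat.add_mod_left, Nat.mod_eq_of_lt hq']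
      rfl
    by_cases hbit : 2^k ≤ m
    · -- top bit of m set: every position keeps a leading '1'
      have hs := pvSplit hbit hm
      set m' := m % 2^k with hm'def
      have hm'lt : m' < 2^k := Nat.mod_lt _ (by positivity)
      rw [show toBinK (k+1) m = '1' :: toBinK k m' from by rw [hs]; exact hq3 m' hm'lt]
      have hprodeq : pvProd ('1' :: toBinK k m') = (pvProd (toBinK k m')).map (fun t => '1' :: t) := by
        simp [pvProd]
      rw [hprodeq]
      constructor
      · intro hx
        obtain ⟨t, ht, rfl⟩ := List.mem_map.mp hx
        obtain ⟨q', hq', rfl, hand⟩ := (ih hm'lt t).mp ht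
        refine ⟨2^k + q', by omega, (hq3 q' hq').symm, ?_⟩
        rw [hs]
        exact (pvAnd_both_pow hm'lt hq').mpr hand
      · rintro ⟨q, hq, rfl, hand⟩
        have hqk : q.testBit k = true := by
          have h1 := (pvAnd_left_iff m q).mp hand k
          rw [pvTopBit hm] at h1
          exact h1 (by simp [hbit])
        have hqge : 2^k ≤ q := by
          by_contra hc
          rw [Nat.testBit_lt_two_pow (by omega)] at hqk
          exact absurd hqk (by simp)
        have hqs := pvSplit hqge hq
        have hq'lt : q % 2^k < 2^k := Nat.mod_lt _ (by positivity)
        rw [hqs, hq3 _ hq'lt]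
        refine List.mem_map.mpr ⟨toBinK k (q % 2^k), ?_, rfl⟩
        refine (ih hm'lt _).mpr ⟨q % 2^k, hq'lt, rfl, ?_⟩
        rw [hs, hqs] at hand
        exact (pvAnd_both_pow hm'lt hq'lt).mp hand
    · -- top bit of m clear
      have hmlt : m < 2^k := by omega
      rw [show toBinK (k+1) m = '0' :: toBinK k m from hq2 m hmlt]
      have hprodeq : pvProd ('0' :: toBinK k m) =
          (pvProd (toBinK k m)).map (fun t => '0' :: t) ++ (pvProd (toBinK k m)).map (fun t => '1' :: t) := by
        simp [pvProd]
      rw [hprodeq]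
      constructor
      · intro hx
        rcases List.mem_append.mp hx with hx | hx
        · obtain ⟨t, ht, rfl⟩ := List.mem_map.mp hx
          obtain ⟨q', hq', rfl, hand⟩ := (ih hmlt t).mp ht
          exact ⟨q', by omega, (hq2 q' hq').symm, hand⟩
        · obtain ⟨t, ht, rfl⟩ := List.mem_map.mp hx
          obtain ⟨q', hq', rfl, hand⟩ := (ih hmlt t).mp ht
          exact ⟨2^k + q', by omega, (hq3 q' hq').symm, (pvAnd_add_pow hmlt).mpr hand⟩
      · rintro ⟨q, hq, rfl, hand⟩
        by_cases hqge : 2^k ≤ q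
        · have hqs := pvSplit hqge hq
          have hq'lt : q % 2^k < 2^k := Nat.mod_lt _ (by positivity)
          rw [hqs, hq3 _ hq'lt]
          refine List.mem_append.mpr (Or.inr (List.mem_map.mpr ⟨toBinK k (q % 2^k), ?_, rfl⟩))
          refine (ih hmlt _).mpr ⟨q % 2^k, hq'lt, rfl, ?_⟩
          rw [hqs] at hand
          exact (pvAnd_add_pow hmlt).mp hand
        · have hqlt : q < 2^k := by omega
          rw [hq2 q hqlt]
          exact List.mem_append.mpr (Or.inl (List.mem_map.mpr
            ⟨toBinK k q, (ih hmlt _).mpr ⟨q, hqlt, rfl, hand⟩, rfl⟩))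

theorem mem_positions {k m : Nat} (hm : m < 2^k) (x : List Char) :
    x ∈ (pvProd (toBinK k m)).erase (toBinK k m) ↔
      ∃ q, q < 2^k ∧ x = toBinK k q ∧ m &&& q = m ∧ q ≠ m := by
  rw [(nodup_pvProd _).mem_erase_iff, mem_pvProd hm]
  constructor
  · rintro ⟨hne, q, hq, rfl, hsub⟩
    exact ⟨q, hq, rfl, hsub, fun h => hne (by rw [h])⟩
  · rintro ⟨q, hq, rfl, hsub, hne⟩
    exact ⟨fun h => hne (toBinK_inj hq hm h), q, hq, rfl, hsub⟩

-- the inner write loop: sets all listed positions to c, leaves the rest alone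
theorem writes_getD {n k : Nat} (hn : n = 2^k) (c : Char) :
    ∀ (ps : List (List Char)), (∀ x ∈ ps, ∃ q, q < n ∧ x = toBinK k q) →
    ∀ (uni : List Char), uni.length = n →
      ((ps.foldl (fun u p => PySem.List.pySetD u ((n : Int) - (pvBinVal p : Int) - 1) c) uni).length = n ∧
       ∀ p0, p0 < n →
        (ps.foldl (fun u p => PySem.List.pySetD u ((n : Int) - (pvBinVal p : Int) - 1) c) uni).getD (n - 1 - p0) ' ' =
          if toBinK k p0 ∈ ps then c else uni.getD (n - 1 - p0) ' ') := by
  intro ps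
  induction ps with
  | nil =>
    intro _ uni hlen
    simp [hlen]
  | cons x rest ih =>
    intro hps uni hlen
    obtain ⟨q, hqn, rfl⟩ := hps _ List.mem_cons_self
    have hrest : ∀ y ∈ rest, ∃ q', q' < n ∧ y = toBinK k q' :=
      fun y hy => hps y (List.mem_cons_of_mem _ hy)
    have hbv : pvBinVal (toBinK k q) = q := by
      rw [pvBinVal_toBinK, Nat.mod_eq_of_lt (hn ▸ hqn)]
    simp only [List.foldl_cons]
    have hcast : ((n : Int) - (pvBinVal (toBinK k q) : Int) - 1) = ((n - q - 1 : Nat) : Int) := by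
      rw [hbv]; omega
    rw [hcast, PySem.List.pySetD_natCast]
    have hlen1 : (uni.set (n - q - 1) c).length = n := by
      rw [List.length_set, hlen]
    obtain ⟨ihl, ihg⟩ := ih hrest _ hlen1
    refine ⟨ihl, ?_⟩
    intro p0 hp0
    rw [ihg p0 hp0]
    by_cases hpq : p0 = q
    · subst hpq
      have hmem : toBinK k p0 ∈ toBinK k p0 :: rest := List.mem_cons_self
      rw [if_pos hmem]
      have hget : (uni.set (n - p0 - 1) c).getD (n - 1 - p0) ' ' = c := by
        rw [List.getD_eq_getElem?_getD, List.getElem?_set]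
        have he : n - p0 - 1 = n - 1 - p0 := by omega
        rw [if_pos he, hlen]
        rw [if_pos (by omega)]
        rfl
      rw [hget]
      split <;> rfl
    · have hne : toBinK k p0 ≠ toBinK k q :=
        fun h => hpq (toBinK_inj (hn ▸ hp0) (hn ▸ hqn) h)
      have hmem : (toBinK k p0 ∈ toBinK k q :: rest) ↔ (toBinK k p0 ∈ rest) := by
        simp [List.mem_cons, hne]
      have hget : (uni.set (n - q - 1) c).getD (n - 1 - p0) ' ' =
          uni.getD (n - 1 - p0) ' ' := by
        rw [List.getD_eq_getElem?_getD, List.getElem?_set]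
        rw [if_neg (by omega), ← List.getD_eq_getElem?_getD]
      rw [hget]
      by_cases hin : toBinK k p0 ∈ rest
      · rw [if_pos hin, if_pos (hmem.mpr hin)]
      · rw [if_neg hin, if_neg (fun h => hin (hmem.mp h))]

-- the truth condition: some strict submask position of p among the first m holds '1'
def pvS1 (orig : List Char) (m p : Nat) : Bool :=
  (List.range m).any (fun j => (j &&& p == j) && (j != p) && (orig.getD (orig.length - 1 - j) ' ' == '1'))

theorem pvS1_iff (orig : List Char) (m p : Nat) :
    pvS1 orig m p = true ↔
      ∃ j, j < m ∧ j &&& p = j ∧ j ≠ p ∧ orig.getD (orig.length - 1 - j) ' ' = '1' := by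
  simp [pvS1, List.any_eq_true, and_assoc]

theorem pvS1_succ_of_closed {orig : List Char} {m p : Nat}
    (hmm : pvS1 orig m m = true) (hsub : m &&& p = m) (hne : m ≠ p) : pvS1 orig m p = true := by
  rw [pvS1_iff] at hmm ⊢
  obtain ⟨j, hj, hjs, hjne, hj1⟩ := hmm
  refine ⟨j, hj, pvAnd_trans hjs hsub, ?_, hj1⟩
  rintro rfl
  exact hne (pvAnd_antisymm hsub hjs)

theorem pvS1_succ_iff (orig : List Char) (m p : Nat) :
    pvS1 orig (m+1) p = true ↔
      pvS1 orig m p = true ∨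
        (m &&& p = m ∧ m ≠ p ∧ orig.getD (orig.length - 1 - m) ' ' = '1') := by
  rw [pvS1_iff, pvS1_iff]
  constructor
  · rintro ⟨j, hj, hsub, hne, h1⟩
    rcases Nat.lt_succ_iff_lt_or_eq.mp hj with h | h
    · exact Or.inl ⟨j, h, hsub, hne, h1⟩
    · subst h
      exact Or.inr ⟨hsub, hne, h1⟩
  · rintro (⟨j, hj, hsub, hne, h1⟩ | ⟨hsub, hne, h1⟩)
    · exact ⟨j, by omega, hsub, hne, h1⟩
    · exact ⟨m, by omega, hsub, hne, h1⟩

theorem pvS1_succ_eq (orig : List Char) (m p : Nat)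
    (h : pvS1 orig m m = true ∨ orig.getD (orig.length - 1 - m) ' ' ≠ '1') :
    pvS1 orig (m+1) p = pvS1 orig m p := by
  apply Bool.eq_iff_iff.mpr
  rw [pvS1_succ_iff]
  constructor
  · rintro (hp | ⟨hsub, hne, h1⟩)
    · exact hp
    · rcases h with hSmm | hO
      · exact pvS1_succ_of_closed hSmm hsub hne
      · exact absurd h1 hO
  · exact Or.inl

-- the main loop invariant for A
theorem invA (orig : List Char) (k : Nat) (hk : 1 ≤ k) (hn : orig.length = 2^k) (max : Bool) :
    ∀ m, m ≤ orig.length →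
      (((List.range m).foldl (pvStepA orig.length k max) (orig, [])).1.length = orig.length) ∧
      (∀ p, p < orig.length →
        ((List.range m).foldl (pvStepA orig.length k max) (orig, [])).1.getD (orig.length - 1 - p) ' ' =
          if pvS1 orig m p then (if max then '1' else '0') else orig.getD (orig.length - 1 - p) ' ') ∧
      (∀ q, q < orig.length →
        (toBinK k q ∈ ((List.range m).foldl (pvStepA orig.length k max) (orig, [])).2 ↔ pvS1 orig m q = true)) := by
  intro m
  induction m with
  | zero =>
    intro _
    refine ⟨rfl, ?_, ?_⟩
    · intro p _
      have h0 : pvS1 orig 0 p = false := rfl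
      rw [h0]
      rfl
    · intro q _
      simp [pvS1]
  | succ m ih =>
    intro hm1
    have hm : m < orig.length := by omega
    obtain ⟨hlen, hgetD, hmod⟩ := ih (by omega)
    rw [List.range_succ, List.foldl_append, List.foldl_cons, List.foldl_nil]
    set st := (List.range m).foldl (pvStepA orig.length k max) (orig, []) with hst
    have hidx : orig.length - m - 1 = orig.length - 1 - m := by omega
    have hread : st.1.getD (orig.length - m - 1) ' ' =
        if pvS1 orig m m then (if max then '1' else '0') else orig.getD (orig.length - 1 - m) ' ' := by
      rw [hidx]; exact hgetD m hm
    have hpf : pvFormat m k = toBinK k m := pvFormat_eq hk (hn ▸ hm)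
    have hbimem : (pvFormat m k ∈ st.2) ↔ pvS1 orig m m = true := by
      rw [hpf]; exact hmod m hm
    simp only [pvStepA]
    by_cases hcond : st.1.getD (orig.length - m - 1) ' ' = '1'
    · rw [if_pos hcond]
      by_cases hbi : pvFormat m k ∈ st.2
      · rw [if_pos hbi]
        have hSmm : pvS1 orig m m = true := hbimem.mp hbi
        have hsteq : ∀ p, pvS1 orig (m+1) p = pvS1 orig m p :=
          fun p => pvS1_succ_eq orig m p (Or.inl hSmm)
        refine ⟨hlen, ?_, ?_⟩
        · intro p hp
          rw [hsteq p]
          exact hgetD p hp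
        · intro q hq
          rw [hsteq q]
          exact hmod q hq
      · rw [if_neg hbi]
        have hSmm : pvS1 orig m m = false :=
          Bool.eq_false_iff.mpr (fun h => hbi (hbimem.mpr h))
        have hO : orig.getD (orig.length - 1 - m) ' ' = '1' := by
          rw [hread, hSmm] at hcond
          exact hcond
        have hposmem : ∀ x, x ∈ (pvProd (pvFormat m k)).erase (pvFormat m k) ↔
            ∃ q, q < 2^k ∧ x = toBinK k q ∧ m &&& q = m ∧ q ≠ m := by
          intro x
          rw [hpf]
          exact mem_positions (hn ▸ hm) x
        have hps : ∀ x ∈ (pvProd (pvFormat m k)).erase (pvFormat m k),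
            ∃ q, q < orig.length ∧ x = toBinK k q := by
          intro x hx
          obtain ⟨q, hq, hxq, -, -⟩ := (hposmem x).mp hx
          exact ⟨q, by omega, hxq⟩
        obtain ⟨hwlen, hwget⟩ := writes_getD hn (if max then '1' else '0')
          ((pvProd (pvFormat m k)).erase (pvFormat m k)) hps st.1 hlen
        have hmemp : ∀ p, p < orig.length →
            ((toBinK k p ∈ (pvProd (pvFormat m k)).erase (pvFormat m k)) ↔ (m &&& p = m ∧ p ≠ m)) := by
          intro p hp
          rw [hposmem]
          constructor
          · rintro ⟨q, hq, hpq, hsub, hne⟩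
            have : q = p := toBinK_inj (by omega) (hn ▸ hp) hpq.symm
            subst this
            exact ⟨hsub, hne⟩
          · rintro ⟨hsub, hne⟩
            exact ⟨p, hn ▸ hp, rfl, hsub, hne⟩
        have hS1p : ∀ p, (pvS1 orig (m+1) p = true) ↔
            (pvS1 orig m p = true ∨ (m &&& p = m ∧ p ≠ m)) := by
          intro p
          rw [pvS1_succ_iff]
          constructor
          · rintro (h | ⟨hsub, hne, -⟩)
            · exact Or.inl h
            · exact Or.inr ⟨hsub, fun h => hne h.symm⟩
          · rintro (h | ⟨hsub, hne⟩)
            · exact Or.inl h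
            · exact Or.inr ⟨hsub, fun h => hne h.symm, hO⟩
        refine ⟨hwlen, ?_, ?_⟩
        · intro p hp
          rw [hwget p hp, hgetD p hp]
          by_cases hin : m &&& p = m ∧ p ≠ m
          · rw [if_pos ((hmemp p hp).mpr hin)]
            have : pvS1 orig (m+1) p = true := (hS1p p).mpr (Or.inr hin)
            rw [this, if_pos rfl]
          · rw [if_neg (fun h => hin ((hmemp p hp).mp h))]
            by_cases hS : pvS1 orig m p = true
            · rw [hS]
              have : pvS1 orig (m+1) p = true := (hS1p p).mpr (Or.inl hS)
              rw [this]
            · have h1 : pvS1 orig m p = false := Bool.eq_false_iff.mpr hS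
              have h2 : pvS1 orig (m+1) p = false := by
                apply Bool.eq_false_iff.mpr
                intro h
                rcases (hS1p p).mp h with h' | h'
                · exact hS h'
                · exact hin h'
              rw [h1, h2]
        · intro q hq
          rw [List.mem_append, hmod q hq, hmemp q hq, hS1p q]
    · rw [if_neg hcond]
      have halt : pvS1 orig m m = true ∨ orig.getD (orig.length - 1 - m) ' ' ≠ '1' := by
        by_cases hS : pvS1 orig m m = true
        · exact Or.inl hS
        · right
          intro hO
          apply hcond
          rw [hread]
          rw [Bool.eq_false_iff.mpr hS]
          exact hO
      have hsteq : ∀ p, pvS1 orig (m+1) p = pvS1 orig m p :=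
        fun p => pvS1_succ_eq orig m p halt
      refine ⟨hlen, ?_, ?_⟩
      · intro p hp
        rw [hsteq p]
        exact hgetD p hp
      · intro q hq
        rw [hsteq q]
        exact hmod q hq

-- ===== VERDICT (by name: the statement is the Claim_ definition above) =====
-- ===== B-side: correctness of the subset-lattice (zeta) DP =====

theorem pvBitNe (a d : Nat) : (a &&& (1 <<< d) ≠ 0) ↔ a.testBit d = true := by
  rw [Nat.one_shiftLeft]
  constructor
  · intro h
    by_contra hc
    apply h
    apply Nat.eq_of_testBit_eq
    intro t
    simp only [Nat.testBit_and, Nat.testBit_two_pow, Nat.zero_testBit]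
    by_cases ht : d = t
    · subst ht
      simp [Bool.not_eq_true] at hc
      simp [hc]
    · simp [ht]
  · intro h hc
    have h2 := congrArg (fun x => x.testBit d) hc
    simp [Nat.testBit_and, h] at h2
theorem pvLt2 (a b : Nat) : a < 2^b ↔ ∀ t, b ≤ t → a.testBit t = false := by
  constructor
  · intro h t ht
    exact pvTestBit_high h ht
  · exact Nat.lt_pow_two_of_testBit a

-- ∃ a '1'-position j ⊆ i differing from i only in the first d dimensions
def pvZ (orig : List Char) (n d i : Nat) : Prop :=
  ∃ j, j &&& i = j ∧ i ^^^ j < 2^d ∧ orig.getD (n - 1 - j) ' ' = '1'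

-- computable form of pvZ (a submask satisfies j ≤ i)
def pvZb (orig : List Char) (n d i : Nat) : Bool :=
  (List.range (i+1)).any
    (fun j => (j &&& i == j) && decide (i ^^^ j < 2^d) && (orig.getD (n - 1 - j) ' ' == '1'))

theorem pvZb_iff (orig : List Char) (n d i : Nat) : pvZb orig n d i = true ↔ pvZ orig n d i := by
  unfold pvZb pvZ
  simp only [List.any_eq_true, List.mem_range, Bool.and_eq_true, beq_iff_eq, decide_eq_true_eq]
  constructor
  · rintro ⟨j, -, ⟨hsub, hlt⟩, h1⟩
    exact ⟨j, hsub, hlt, h1⟩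
  · rintro ⟨j, hsub, hlt, h1⟩
    have hle : j ≤ i := by
      have := Nat.and_le_right (n := j) (m := i)
      omega
    exact ⟨j, by omega, ⟨hsub, hlt⟩, h1⟩

theorem pvZ_zero (orig : List Char) (n i : Nat) :
    pvZ orig n 0 i ↔ orig.getD (n - 1 - i) ' ' = '1' := by
  constructor
  · rintro ⟨j, hsub, hlt, h1⟩
    have hz : i ^^^ j = 0 := by omega
    have := Nat.xor_eq_zero.mp hz
    subst this
    exact h1
  · intro h
    exact ⟨i, Nat.and_self i, by simp, h⟩

theorem boolFalse {b : Bool} (h : ¬ b = true) : b = false := Bool.eq_false_iff.mpr h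

theorem pvZ_succ (orig : List Char) (n d i : Nat) :
    pvZ orig n (d+1) i ↔ pvZ orig n d i ∨ (i.testBit d = true ∧ pvZ orig n d (i ^^^ 2^d)) := by
  constructor
  · rintro ⟨j, hsub, hlt, h1⟩
    have hsub' := (pvAnd_left_iff j i).mp hsub
    have hlt' := (pvLt2 _ _).mp hlt
    by_cases hjd : j.testBit d = true
    · left
      refine ⟨j, hsub, ?_, h1⟩
      rw [pvLt2]
      intro t ht
      rcases Nat.eq_or_lt_of_le ht with heq | hgt
      · rw [Nat.testBit_xor, ← heq, hsub' d hjd, hjd]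
        rfl
      · exact hlt' t (by omega)
    · by_cases hid : i.testBit d = true
      · right
        refine ⟨hid, j, ?_, ?_, h1⟩
        · rw [pvAnd_left_iff]
          intro t hjt
          have htd : t ≠ d := fun h => hjd (h ▸ hjt)
          rw [Nat.testBit_xor, Nat.testBit_two_pow, hsub' t hjt]
          simp [Ne.symm htd]
        · rw [pvLt2]
          intro t ht
          rcases Nat.eq_or_lt_of_le ht with heq | hgt
          · simp only [Nat.testBit_xor, Nat.testBit_two_pow, ← heq, hid]
            simp [Bool.not_eq_true] at hjd
            simp [hjd]
          · have hx := hlt' t (by omega)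
            rw [Nat.testBit_xor] at hx
            rw [Nat.testBit_xor, Nat.testBit_xor, Nat.testBit_two_pow]
            have hdec : (decide (d = t)) = false := by simp; omega
            rw [hdec, Bool.xor_false]
            exact hx
      · left
        refine ⟨j, hsub, ?_, h1⟩
        rw [pvLt2]
        intro t ht
        rcases Nat.eq_or_lt_of_le ht with heq | hgt
        · rw [Nat.testBit_xor, ← heq]
          simp [Bool.not_eq_true] at hjd hid
          simp [hjd, hid]
        · exact hlt' t (by omega)
  · rintro (⟨j, hsub, hlt, h1⟩ | ⟨hid, j, hsub, hlt, h1⟩)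
    · refine ⟨j, hsub, ?_, h1⟩
      have : (2:Nat)^d ≤ 2^(d+1) := Nat.pow_le_pow_right (by omega) (by omega)
      omega
    · have hsub' := (pvAnd_left_iff j (i ^^^ 2^d)).mp hsub
      have hlt' := (pvLt2 _ _).mp hlt
      refine ⟨j, ?_, ?_, h1⟩
      · rw [pvAnd_left_iff]
        intro t hjt
        have h2 := hsub' t hjt
        rw [Nat.testBit_xor, Nat.testBit_two_pow] at h2
        by_cases htd : t = d
        · subst htd
          rw [hid]
        · simp [Ne.symm htd] at h2
          exact h2
      · rw [pvLt2]
        intro t ht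
        have hx := hlt' t (by omega)
        rw [Nat.testBit_xor, Nat.testBit_xor, Nat.testBit_two_pow] at hx
        rw [Nat.testBit_xor]
        have hdec : (decide (d = t)) = false := by simp; omega
        rw [hdec, Bool.xor_false] at hx
        exact hx

-- one OR-pass of the DP along dimension d
theorem pvPass (n d : Nat) (s : List Bool) (hs : s.length = n) :
    (((List.range n).foldl (fun s i =>
        if i &&& (1 <<< d) ≠ 0 then s.set i (s.getD i false || s.getD (i ^^^ (1 <<< d)) false) else s) s).length = n) ∧
    (∀ t, t < n →
      ((List.range n).foldl (fun s i =>
        if i &&& (1 <<< d) ≠ 0 then s.set i (s.getD i false || s.getD (i ^^^ (1 <<< d)) false) else s) s).getD t false =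
        if t &&& (1 <<< d) ≠ 0 then s.getD t false || s.getD (t ^^^ (1 <<< d)) false else s.getD t false) := by
  suffices h : ∀ m, m ≤ n →
      (((List.range m).foldl (fun s i =>
        if i &&& (1 <<< d) ≠ 0 then s.set i (s.getD i false || s.getD (i ^^^ (1 <<< d)) false) else s) s).length = n) ∧
      (∀ t, t < n →
        ((List.range m).foldl (fun s i =>
          if i &&& (1 <<< d) ≠ 0 then s.set i (s.getD i false || s.getD (i ^^^ (1 <<< d)) false) else s) s).getD t false =
          if t < m ∧ t &&& (1 <<< d) ≠ 0 then s.getD t false || s.getD (t ^^^ (1 <<< d)) false else s.getD t false) by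
    obtain ⟨h1, h2⟩ := h n le_rfl
    refine ⟨h1, ?_⟩
    intro t ht
    rw [h2 t ht]
    by_cases hb : t &&& (1 <<< d) ≠ 0
    · rw [if_pos ⟨ht, hb⟩, if_pos hb]
    · rw [if_neg (fun hh => hb hh.2), if_neg hb]
  intro m
  induction m with
  | zero =>
    intro _
    refine ⟨hs, ?_⟩
    intro t ht
    rw [List.range_zero, List.foldl_nil, if_neg (by omega)]
  | succ m ih =>
    intro hm1
    obtain ⟨hlen, hval⟩ := ih (by omega)
    rw [List.range_succ, List.foldl_append, List.foldl_cons, List.foldl_nil]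
    by_cases hb : m &&& (1 <<< d) ≠ 0
    · rw [if_pos hb]
      have hr1 : ((List.range m).foldl (fun s i =>
          if i &&& (1 <<< d) ≠ 0 then s.set i (s.getD i false || s.getD (i ^^^ (1 <<< d)) false) else s) s).getD m false
          = s.getD m false := by
        rw [hval m (by omega), if_neg (by omega)]
      have hbitclear : ¬ ((m ^^^ (1 <<< d)) &&& (1 <<< d) ≠ 0) := by
        intro hc
        rw [pvBitNe] at hc hb
        rw [Nat.testBit_xor, Nat.one_shiftLeft, Nat.testBit_two_pow, hb] at hc
        simp at hc
      have hr2 : ((List.range m).foldl (fun s i =>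
          if i &&& (1 <<< d) ≠ 0 then s.set i (s.getD i false || s.getD (i ^^^ (1 <<< d)) false) else s) s).getD (m ^^^ (1 <<< d)) false
          = s.getD (m ^^^ (1 <<< d)) false := by
        by_cases hin : m ^^^ (1 <<< d) < n
        · rw [hval _ hin, if_neg (fun hh => hbitclear hh.2)]
        · rw [List.getD_eq_getElem?_getD, List.getElem?_eq_none (by omega),
            List.getD_eq_getElem?_getD, List.getElem?_eq_none (by omega)]
      refine ⟨by rw [List.length_set, hlen], ?_⟩
      intro t ht
      rw [List.getD_eq_getElem?_getD, List.getElem?_set]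
      by_cases hmt : m = t
      · subst hmt
        rw [if_pos rfl, if_pos (by omega)]
        simp only [Option.getD_some]
        rw [hr1, hr2, if_pos ⟨by omega, hb⟩]
      · rw [if_neg hmt, ← List.getD_eq_getElem?_getD, hval t ht]
        by_cases hcond : t < m ∧ t &&& (1 <<< d) ≠ 0
        · rw [if_pos hcond, if_pos ⟨by omega, hcond.2⟩]
        · rw [if_neg hcond]
          have hneg : ¬ (t < m + 1 ∧ t &&& (1 <<< d) ≠ 0) := by
            rintro ⟨h1', h2'⟩
            exact hcond ⟨by omega, h2'⟩
          rw [if_neg hneg]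
    · rw [if_neg hb]
      refine ⟨hlen, ?_⟩
      intro t ht
      rw [hval t ht]
      by_cases hcond : t < m ∧ t &&& (1 <<< d) ≠ 0
      · rw [if_pos hcond, if_pos ⟨by omega, hcond.2⟩]
      · rw [if_neg hcond]
        have hneg : ¬ (t < m + 1 ∧ t &&& (1 <<< d) ≠ 0) := by
          rintro ⟨h1', h2'⟩
          by_cases htm : t = m
          · subst htm
            exact hb h2'
          · exact hcond ⟨by omega, h2'⟩
        rw [if_neg hneg]

-- the DP table after the first d dimensions
theorem pvZeta (orig : List Char) (n k : Nat) (hn : n = 2^k) :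
    ∀ d, d ≤ k →
      (((List.range d).foldl (fun s d =>
          (List.range n).foldl (fun s i =>
            if i &&& (1 <<< d) ≠ 0 then s.set i (s.getD i false || s.getD (i ^^^ (1 <<< d)) false) else s) s)
        ((List.range n).map (fun i => orig.getD (n - 1 - i) ' ' == '1'))).length = n) ∧
      (∀ i, i < n →
        (((List.range d).foldl (fun s d =>
          (List.range n).foldl (fun s i =>
            if i &&& (1 <<< d) ≠ 0 then s.set i (s.getD i false || s.getD (i ^^^ (1 <<< d)) false) else s) s)
        ((List.range n).map (fun i => orig.getD (n - 1 - i) ' ' == '1'))).getD i false =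
          pvZb orig n d i)) := by
  intro d
  induction d with
  | zero =>
    intro _
    refine ⟨by simp, ?_⟩
    intro i hi
    rw [List.range_zero, List.foldl_nil, PySem.List.getD_map_range _ _ _ _ hi]
    apply Bool.eq_iff_iff.mpr
    rw [beq_iff_eq, pvZb_iff, pvZ_zero]
  | succ d ih =>
    intro hd1
    obtain ⟨hlen, hval⟩ := ih (by omega)
    rw [List.range_succ, List.foldl_append, List.foldl_cons, List.foldl_nil]
    obtain ⟨hplen, hpval⟩ := pvPass n d _ hlen
    refine ⟨hplen, ?_⟩
    intro i hi
    rw [hpval i hi]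
    have hxin : i ^^^ (1 <<< d) < n := by
      rw [Nat.one_shiftLeft, hn]
      exact Nat.xor_lt_two_pow (hn ▸ hi) (Nat.pow_lt_pow_right (by omega) (by omega))
    by_cases hb : i &&& (1 <<< d) ≠ 0
    · rw [if_pos hb, hval i hi, hval _ hxin]
      apply Bool.eq_iff_iff.mpr
      rw [Bool.or_eq_true, pvZb_iff, pvZb_iff, pvZb_iff, pvZ_succ]
      have hbit : i.testBit d = true := (pvBitNe i d).mp hb
      rw [Nat.one_shiftLeft]
      constructor
      · rintro (h | h)
        · exact Or.inl h
        · exact Or.inr ⟨hbit, h⟩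
      · rintro (h | ⟨-, h⟩)
        · exact Or.inl h
        · exact Or.inr h
    · rw [if_neg hb, hval i hi]
      apply Bool.eq_iff_iff.mpr
      rw [pvZb_iff, pvZb_iff, pvZ_succ]
      have hbit : i.testBit d = false :=
        boolFalse (fun h => hb ((pvBitNe i d).mpr h))
      constructor
      · exact Or.inl
      · rintro (h | ⟨hc, -⟩)
        · exact h
        · rw [hbit] at hc
          exact absurd hc (by simp)

-- the strict-submask read-out equals A's truth condition
theorem pvStrict_iff (orig : List Char) (n k i : Nat) (hn : n = 2^k) (horig : orig.length = n)
    (hi : i < n) :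
    (∃ d, d < k ∧ i.testBit d = true ∧ pvZ orig n k (i ^^^ 2^d)) ↔ pvS1 orig n i = true := by
  rw [pvS1_iff, horig]
  constructor
  · rintro ⟨d, hd, hid, j, hsub, -, h1⟩
    have hsub' := (pvAnd_left_iff j (i ^^^ 2^d)).mp hsub
    have hjd : j.testBit d = false := by
      apply boolFalse
      intro h
      have h2 := hsub' d h
      rw [Nat.testBit_xor, Nat.testBit_two_pow, hid] at h2
      simp at h2
    have hsubi : j &&& i = j := by
      rw [pvAnd_left_iff]
      intro t hjt
      have htd : t ≠ d := fun h => by rw [h, hjd] at hjt; exact absurd hjt (by simp)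
      have h2 := hsub' t hjt
      rw [Nat.testBit_xor, Nat.testBit_two_pow] at h2
      simp only [Ne.symm htd, decide_false, Bool.xor_false] at h2
      exact h2
    have hne : j ≠ i := by
      intro h
      rw [h, hid] at hjd
      exact absurd hjd (by simp)
    have hjlt : j < n := by
      have h2 : j ≤ i ^^^ 2^d := by
        have := Nat.and_le_right (n := j) (m := i ^^^ 2^d)
        omega
      have h3 : i ^^^ 2^d < n := by
        rw [hn]
        exact Nat.xor_lt_two_pow (hn ▸ hi) (Nat.pow_lt_pow_right (by omega)
          (by
            have h4 : 2^d ≤ i := Nat.ge_two_pow_of_testBit hid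
            have h5 : i < 2^k := hn ▸ hi
            by_contra hc
            have : (2:Nat)^k ≤ 2^d := Nat.pow_le_pow_right (by omega) (by omega)
            omega))
      omega
    exact ⟨j, hjlt, hsubi, hne, h1⟩
  · rintro ⟨j, hjn, hsub, hne, h1⟩
    have hsub' := (pvAnd_left_iff j i).mp hsub
    have hxne : i ^^^ j ≠ 0 := by
      intro h
      exact hne (Nat.xor_eq_zero.mp h).symm
    have hex : ∃ t, (i ^^^ j).testBit t = true := by
      by_contra hc
      apply hxne
      apply Nat.eq_of_testBit_eq
      intro t
      rw [Nat.zero_testBit]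
      exact boolFalse (fun ht => hc ⟨t, ht⟩)
    obtain ⟨d, hd⟩ := hex
    rw [Nat.testBit_xor] at hd
    have hjd : j.testBit d = false := by
      apply boolFalse
      intro h
      rw [h, hsub' d h] at hd
      exact absurd hd (by simp)
    have hid : i.testBit d = true := by
      rw [hjd] at hd
      simpa using hd
    have hdk : d < k := by
      have h4 : 2^d ≤ i := Nat.ge_two_pow_of_testBit hid
      have h5 : i < 2^k := hn ▸ hi
      by_contra hc
      have : (2:Nat)^k ≤ 2^d := Nat.pow_le_pow_right (by omega) (by omega)
      omega
    refine ⟨d, hdk, hid, j, ?_, ?_, h1⟩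
    · rw [pvAnd_left_iff]
      intro t hjt
      have htd : t ≠ d := fun h => by rw [h, hjd] at hjt; exact absurd hjt (by simp)
      rw [Nat.testBit_xor, Nat.testBit_two_pow, hsub' t hjt]
      simp [Ne.symm htd]
    · have h2 : i ^^^ 2^d < 2^k := Nat.xor_lt_two_pow (hn ▸ hi)
        (Nat.pow_lt_pow_right (by omega) hdk)
      exact Nat.xor_lt_two_pow h2 (by omega)

-- all-false DP states stay all-false (used when the input has no '1' at all)
theorem pvSetFalse {s : List Bool} (h : ∀ t, s.getD t false = false) (i : Nat) :
    ∀ t, (s.set i false).getD t false = false := by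
  intro t
  rw [List.getD_eq_getElem?_getD, List.getElem?_set]
  by_cases hit : i = t
  · rw [if_pos hit]
    split <;> simp
  · rw [if_neg hit, ← List.getD_eq_getElem?_getD]
    exact h t

theorem pvPassFalse (n d : Nat) (l : List Nat) : ∀ (s : List Bool), (∀ t, s.getD t false = false) →
    ∀ t, (l.foldl (fun s i =>
      if i &&& (1 <<< d) ≠ 0 then s.set i (s.getD i false || s.getD (i ^^^ (1 <<< d)) false) else s) s).getD t false = false := by
  induction l with
  | nil =>
    intro s h t
    exact h t
  | cons i l ih =>
    intro s h t
    rw [List.foldl_cons]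
    by_cases hb : i &&& (1 <<< d) ≠ 0
    · rw [if_pos hb]
      have hval : (s.getD i false || s.getD (i ^^^ (1 <<< d)) false) = false := by
        rw [h, h]
        rfl
      rw [hval]
      exact ih _ (pvSetFalse h i) t
    · rw [if_neg hb]
      exact ih _ h t

theorem pvZetaFalse (n : Nat) (ds : List Nat) : ∀ (s : List Bool), (∀ t, s.getD t false = false) →
    ∀ t, (ds.foldl (fun s d =>
      (List.range n).foldl (fun s i =>
        if i &&& (1 <<< d) ≠ 0 then s.set i (s.getD i false || s.getD (i ^^^ (1 <<< d)) false) else s) s) s).getD t false = false := by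
  induction ds with
  | nil =>
    intro s h t
    exact h t
  | cons d ds ih =>
    intro s h t
    rw [List.foldl_cons]
    exact ih _ (pvPassFalse n d (List.range n) s h) t

theorem get_uni_rr_spec : Claim_equal_get_uni_rr := by
  intro rr max _ hpre
  unfold Spec_get_uni_rr
  obtain ⟨hne, hcase⟩ := hpre
  have hL : rr.toList.length = rr.length := String.length_toList
  rcases hcase with hpow | hno1
  · -- power-of-two length: A's closure loop equals the DP read-out
    simp only [get_uni_rr, get_uni_rr_alt]
    by_cases hk0 : Nat.log2 rr.length = 0
    · have h1 : rr.length = 1 := by rw [hpow, hk0]; rfl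
      rw [if_pos hk0, if_pos (show rr.length < 2 by omega)]
    · have hk : 1 ≤ Nat.log2 rr.length := by omega
      have h2le : 2 ≤ rr.length := by
        rw [hpow]
        calc (2:Nat) = 2^1 := rfl
          _ ≤ 2^(Nat.log2 rr.length) := Nat.pow_le_pow_right (by omega) hk
      rw [if_neg hk0, if_neg (show ¬ rr.length < 2 by omega)]
      have hsz : Nat.size rr.length - 1 = Nat.log2 rr.length := by
        conv_lhs => rw [hpow, Nat.size_pow]
        omega
      rw [hsz]
      have hn2 : rr.toList.length = 2^(Nat.log2 rr.length) := by
        rw [hL]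
        exact hpow
      obtain ⟨hlen, hgetD, -⟩ := by
        have h := invA rr.toList (Nat.log2 rr.length) hk hn2 max rr.length (by omega)
        rw [hL] at h
        exact h
      obtain ⟨hslen, hsval⟩ := pvZeta rr.toList rr.length (Nat.log2 rr.length) hpow
        (Nat.log2 rr.length) le_rfl
      rw [PySem.List.foldl_append_singleton_eq_map, List.nil_append]
      congr 1
      apply List.ext_getElem
      · simp [hlen]
      · intro idx h1 h2
        have hidx : idx < rr.length := by simpa using h2
        rw [List.getElem_map, List.getElem_range]
        have hp : rr.length - 1 - idx < rr.length := by omega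
        have hval := hgetD (rr.length - 1 - idx) hp
        have hcollapse : rr.length - 1 - (rr.length - 1 - idx) = idx := by omega
        rw [hcollapse] at hval
        have hgd : ((List.range rr.length).foldl (pvStepA rr.length (Nat.log2 rr.length) max) (rr.toList, [])).1[idx] =
            ((List.range rr.length).foldl (pvStepA rr.length (Nat.log2 rr.length) max) (rr.toList, [])).1.getD idx ' ' := by
          rw [List.getD_eq_getElem?_getD, List.getElem?_eq_getElem h1]
          rfl
        rw [hgd, hval]
        have hany : ((List.range (Nat.log2 rr.length)).any
            (fun d => decide ((rr.length - 1 - idx) &&& (1 <<< d) ≠ 0) &&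
              (((List.range (Nat.log2 rr.length)).foldl (fun s d =>
                (List.range rr.length).foldl (fun s i =>
                  if i &&& (1 <<< d) ≠ 0 then s.set i (s.getD i false || s.getD (i ^^^ (1 <<< d)) false) else s) s)
                ((List.range rr.length).map (fun i => rr.toList.getD (rr.length - 1 - i) ' ' == '1'))).getD
                  ((rr.length - 1 - idx) ^^^ (1 <<< d)) false))) =
            pvS1 rr.toList rr.length (rr.length - 1 - idx) := by
          apply Bool.eq_iff_iff.mpr
          rw [← pvStrict_iff rr.toList rr.length (Nat.log2 rr.length) (rr.length - 1 - idx) hpow hL hp]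
          simp only [List.any_eq_true, List.mem_range, Bool.and_eq_true, decide_eq_true_eq]
          constructor
          · rintro ⟨d, hdk, hbit, hsub⟩
            have hxin : (rr.length - 1 - idx) ^^^ (1 <<< d) < rr.length := by
              rw [Nat.one_shiftLeft, hpow]
              exact Nat.xor_lt_two_pow (hpow ▸ hp) (Nat.pow_lt_pow_right (by omega) hdk)
            rw [hsval _ hxin, pvZb_iff, Nat.one_shiftLeft] at hsub
            exact ⟨d, hdk, (pvBitNe _ _).mp hbit, hsub⟩
          · rintro ⟨d, hdk, hbit, hz⟩
            have hxin : (rr.length - 1 - idx) ^^^ (1 <<< d) < rr.length := by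
              rw [Nat.one_shiftLeft, hpow]
              exact Nat.xor_lt_two_pow (hpow ▸ hp) (Nat.pow_lt_pow_right (by omega) hdk)
            refine ⟨d, hdk, (pvBitNe _ _).mpr hbit, ?_⟩
            rw [hsval _ hxin, pvZb_iff, Nat.one_shiftLeft]
            exact hz
        rw [hany]
  · -- rr contains no '1': both programs return rr unchanged
    have hnochar : ∀ t : Nat, rr.toList.getD t ' ' ≠ '1' := by
      intro t
      by_cases ht : t < rr.toList.length
      · rw [List.getD_eq_getElem?_getD, List.getElem?_eq_getElem ht]
        intro h
        exact hno1 (h ▸ List.getElem_mem ht)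
      · rw [List.getD_eq_getElem?_getD, List.getElem?_eq_none (by omega)]
        decide
    simp only [get_uni_rr, get_uni_rr_alt]
    by_cases hk0 : Nat.log2 rr.length = 0
    · have hlt2 : rr.length < 2 := by
        by_contra hc
        have := (Nat.le_log2 (n := rr.length) (k := 1) (by omega)).mpr (by simpa using hc)
        omega
      rw [if_pos hk0, if_pos hlt2]
    · have hge2 : 2 ≤ rr.length := by
        by_contra hc
        have h1 : rr.length = 1 := by omega
        exact hk0 (by rw [h1]; rfl)
      rw [if_neg hk0, if_neg (show ¬ rr.length < 2 by omega)]
      have hfix : ∀ m, (List.range m).foldl (pvStepA rr.length (Nat.log2 rr.length) max) (rr.toList, []) = (rr.toList, []) := by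
        intro m
        induction m with
        | zero => rfl
        | succ m ih =>
          rw [List.range_succ, List.foldl_append, ih, List.foldl_cons, List.foldl_nil]
          simp only [pvStepA]
          rw [if_neg (hnochar _)]
      rw [hfix]
      have hsub0 : ∀ t, ((List.range rr.length).map
          (fun i => rr.toList.getD (rr.length - 1 - i) ' ' == '1')).getD t false = false := by
        intro t
        by_cases ht : t < rr.length
        · rw [PySem.List.getD_map_range _ _ _ _ ht]
          exact Bool.eq_false_iff.mpr (fun h => hnochar _ (beq_iff_eq.mp h))
        · rw [List.getD_eq_getElem?_getD, List.getElem?_eq_none (by simp; omega)]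
          rfl
      rw [PySem.List.foldl_append_singleton_eq_map, List.nil_append]
      have hmap : List.map (fun idx =>
          if (List.range (Nat.size rr.length - 1)).any
              (fun d => decide ((rr.length - 1 - idx) &&& (1 <<< d) ≠ 0) &&
                (((List.range (Nat.size rr.length - 1)).foldl (fun s d =>
                  (List.range rr.length).foldl (fun s i =>
                    if i &&& (1 <<< d) ≠ 0 then s.set i (s.getD i false || s.getD (i ^^^ (1 <<< d)) false) else s) s)
                  ((List.range rr.length).map (fun i => rr.toList.getD (rr.length - 1 - i) ' ' == '1'))).getD
                    ((rr.length - 1 - idx) ^^^ (1 <<< d)) false)) then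
            (if max then '1' else '0')
          else rr.toList.getD idx ' ') (List.range rr.length) = rr.toList := by
        apply List.ext_getElem
        · simp [hL]
        · intro idx h1 h2
          rw [List.getElem_map, List.getElem_range]
          have hany : (List.range (Nat.size rr.length - 1)).any
              (fun d => decide ((rr.length - 1 - idx) &&& (1 <<< d) ≠ 0) &&
                (((List.range (Nat.size rr.length - 1)).foldl (fun s d =>
                  (List.range rr.length).foldl (fun s i =>
                    if i &&& (1 <<< d) ≠ 0 then s.set i (s.getD i false || s.getD (i ^^^ (1 <<< d)) false) else s) s)
                  ((List.range rr.length).map (fun i => rr.toList.getD (rr.length - 1 - i) ' ' == '1'))).getD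
                    ((rr.length - 1 - idx) ^^^ (1 <<< d)) false)) = false := by
            apply Bool.eq_false_iff.mpr
            intro h
            simp only [List.any_eq_true, Bool.and_eq_true] at h
            obtain ⟨d, -, -, hsub⟩ := h
            rw [pvZetaFalse rr.length _ _ hsub0] at hsub
            exact absurd hsub (by simp)
          rw [hany]
          simp only [Bool.false_eq_true, if_false]
          rw [List.getD_eq_getElem?_getD, List.getElem?_eq_getElem h2]
          rfl
      rw [hmap, String.ofList_toList]
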